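-- pv_equiv track=rewrite | github.com/mionaD-upc/Capturing-Analytical-Intents-From-Text | Kaggle-DataCollector/label_masking.py | add_spaces_around_slash
-- ===== SOURCE A (Python) =====
-- def add_spaces_around_slash(text):
--     modified_text = ""
--     for char in text:
--         if char == '/':
--             modified_text += ' / '
--         else:
--             modified_text += char
--     return modified_text
-- ===== SOURCE B (Python) =====
-- def add_spaces_around_slash(text):
--     return text.replace('/', ' / ')
-- ===== Notes on version B (the rewrite author's own statement) =====
-- stated objective: idiomatic
-- what changed: Replaced A's per-character accumulation loop (building the result string with += on each character) with a single str.replace('/', ' / ') call.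
import Mathlib
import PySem

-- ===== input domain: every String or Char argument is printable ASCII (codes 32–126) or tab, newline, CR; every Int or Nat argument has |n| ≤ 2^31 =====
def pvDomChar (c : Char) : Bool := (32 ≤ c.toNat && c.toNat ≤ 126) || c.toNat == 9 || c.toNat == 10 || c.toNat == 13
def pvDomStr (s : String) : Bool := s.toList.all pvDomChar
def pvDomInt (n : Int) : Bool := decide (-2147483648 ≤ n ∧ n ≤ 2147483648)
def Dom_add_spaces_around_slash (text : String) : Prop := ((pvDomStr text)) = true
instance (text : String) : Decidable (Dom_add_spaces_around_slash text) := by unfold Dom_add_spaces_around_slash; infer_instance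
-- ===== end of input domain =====

-- B replaces A's per-character accumulation loop with a single str.replace call (idiomatic).

-- ===== PORT A =====
-- literal port of A: fold over the characters, appending ' / ' for '/' and the character itself otherwise
def add_spaces_around_slash (text : String) : String :=
  String.ofList
    (text.toList.foldl
      (fun acc c => acc ++ (if c = '/' then (" / " : String).toList else [c])) [])

-- ===== PORT B =====
-- literal port of B: text.replace('/', ' / ')
def add_spaces_around_slash_alt (text : String) : String :=
  PySem.Str.replace text "/" " / "

-- ===== PRECONDITION & SPEC =====
def Spec_add_spaces_around_slash (text : String) (out : String) : Prop := out = add_spaces_around_slash_alt text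
instance (text : String) (out : String) : Decidable (Spec_add_spaces_around_slash text out) := by unfold Spec_add_spaces_around_slash; infer_instance

-- ===== CLAIM (what is proved, stated in full; the proofs are below) =====
def Claim_equal_add_spaces_around_slash : Prop := ∀ (text : String), Dom_add_spaces_around_slash text → Spec_add_spaces_around_slash text (add_spaces_around_slash text)

-- ===== LEMMAS AND PROOFS =====

-- the per-character expansion A performs
def pvSeg (c : Char) : List Char := if c = '/' then [' ', '/', ' '] else [c]

-- Chars.replace.go with the one-character pattern '/' is exactly the flatMap of pvSeg
lemma pv_replace_go_slash (fuel : Nat) (l acc : List Char) (h : l.length ≤ fuel) :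
    PySem.Chars.replace.go ['/'] [' ', '/', ' '] fuel l acc
      = acc.reverse ++ l.flatMap pvSeg := by
  induction fuel generalizing l acc with
  | zero =>
    have : l = [] := List.eq_nil_of_length_eq_zero (Nat.le_zero.mp h)
    subst this
    simp [PySem.Chars.replace.go]
  | succ n ih =>
    cases l with
    | nil => simp [PySem.Chars.replace.go]
    | cons c t =>
      by_cases hc : c = '/'
      · subst hc
        have hp : List.isPrefixOf ['/'] ('/' :: t) = true := by
          simp [List.isPrefixOf]
        simp only [PySem.Chars.replace.go, hp]
        rw [ih _ _ (by simpa using Nat.le_of_succ_le_succ h)]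
        simp [pvSeg]
      · have hp : List.isPrefixOf ['/'] (c :: t) = false := by
          simp [List.isPrefixOf]
          intro h'; exact hc h'.symm
        simp only [PySem.Chars.replace.go, hp, Bool.false_eq_true, if_false]
        rw [ih _ _ (by simpa using Nat.le_of_succ_le_succ h)]
        simp [pvSeg, hc]

-- A's fold equals Chars.replace on the character list
lemma pv_key (cs : List Char) :
    cs.foldl (fun acc c => acc ++ (if c = '/' then (" / " : String).toList else [c])) []
      = PySem.Chars.replace cs ("/" : String).toList (" / " : String).toList := by
  rw [PySem.List.foldl_append_eq_flatMap]
  have h1 : ("/" : String).toList = ['/'] := by decide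
  have h2 : (" / " : String).toList = [' ', '/', ' '] := by decide
  rw [h1, h2, PySem.Chars.replace]
  simp only [List.isEmpty_cons, Bool.false_eq_true, if_false]
  rw [pv_replace_go_slash cs.length cs [] le_rfl]
  simp only [List.reverse_nil, List.nil_append]
  rfl

-- ===== VERDICT (by name: the statement is the Claim_ definition above) =====
theorem add_spaces_around_slash_spec : Claim_equal_add_spaces_around_slash := by
  intro text _
  unfold Spec_add_spaces_around_slash add_spaces_around_slash add_spaces_around_slash_alt
  rw [PySem.Str.replace, pv_key]
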